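-- pv_equiv track=rewrite | github.com/JTibs18/LeetCode | MinimumNumberOfStepsToMakeTwoStringsAnagram.py | minSteps1
-- ===== SOURCE A (Python) =====
-- def minSteps1(s, t):
--     sDict = dict()
--     tDict = dict()
--     count = 0
--
--     for indx, val in enumerate(s):
--         if val not in sDict:
--             sDict[val] = 1
--         else:
--             sDict[val] += 1
--
--         if t[indx] not in tDict:
--             tDict[t[indx]] = 1
--         else:
--             tDict[t[indx]] += 1
--
--     for key, value in sDict.items():
--         if key in tDict and value > tDict[key]:
--             count += value - tDict[key]
--         elif key not in tDict:
--             count += value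
--
--     return count
-- ===== SOURCE B (Python) =====
-- def minSteps1(s, t):
--     u = [t[i] for i in range(len(s))]
--     a = sorted(s)
--     b = sorted(u)
--     i = j = matched = 0
--     while i < len(a) and j < len(b):
--         if a[i] == b[j]:
--             matched += 1
--             i += 1
--             j += 1
--         elif a[i] < b[j]:
--             i += 1
--         else:
--             j += 1
--     return len(a) - matched
-- ===== Notes on version B (the rewrite author's own statement) =====
-- stated objective: alternative
-- what changed: Replaces A's two frequency dicts and compare pass by sorting s and the matching prefix of t and running a two-pointer merge that counts matched characters, returning len(s) minus the multiset-intersection size.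
import Mathlib
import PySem

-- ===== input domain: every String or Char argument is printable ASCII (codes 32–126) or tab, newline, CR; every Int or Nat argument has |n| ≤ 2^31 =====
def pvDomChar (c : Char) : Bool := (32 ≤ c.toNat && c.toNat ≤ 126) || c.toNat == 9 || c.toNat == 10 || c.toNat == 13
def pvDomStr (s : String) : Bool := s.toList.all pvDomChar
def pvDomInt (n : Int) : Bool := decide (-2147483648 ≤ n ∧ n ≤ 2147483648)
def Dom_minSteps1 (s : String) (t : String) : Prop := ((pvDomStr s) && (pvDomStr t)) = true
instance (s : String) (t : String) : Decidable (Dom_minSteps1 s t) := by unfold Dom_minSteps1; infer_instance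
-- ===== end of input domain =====

-- B replaces A's frequency dicts by sorting s and t's matching prefix and counting
-- matched characters with a two-pointer merge (objective: alternative algorithm).

-- ===== PORT A =====
def minSteps1 (s : String) (t : String) : Int :=
  let sl := s.toList
  let tl := t.toList
  -- first loop: for indx, val in enumerate(s): build sDict and tDict (t[indx] raises iff len t < len s; excluded by Pre_)
  let dicts := (PySem.List.enumerate sl 0).foldl
    (fun (st : PySem.Dict Char Int × PySem.Dict Char Int) p =>
      (if st.1.contains p.2 = false then st.1.insert p.2 1 else st.1.modify p.2 0 (· + 1),
       let c := PySem.List.pyGetD tl p.1 ' ';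
       if st.2.contains c = false then st.2.insert c 1 else st.2.modify c 0 (· + 1)))
    (PySem.Dict.empty, PySem.Dict.empty)
  -- second loop: for key, value in sDict.items()
  dicts.1.items.foldl
    (fun count kv =>
      if dicts.2.contains kv.1 = true ∧ kv.2 > dicts.2.getD kv.1 0 then
        count + (kv.2 - dicts.2.getD kv.1 0)
      else if dicts.2.contains kv.1 = false then count + kv.2
      else count)
    0

-- ===== PORT B =====
-- the while loop with two index pointers, transcribed as structural recursion
-- consuming the heads of the two (sorted) lists
def pvMerge : List Char → List Char → Int
  | [], _ => 0
  | _ :: _, [] => 0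
  | x :: xs, y :: ys =>
    if x = y then 1 + pvMerge xs ys
    else if x < y then pvMerge xs (y :: ys)
    else pvMerge (x :: xs) ys
termination_by a b => a.length + b.length

def minSteps1_alt (s : String) (t : String) : Int :=
  let sl := s.toList
  let tl := t.toList
  -- u = [t[i] for i in range(len(s))]  (raises iff len t < len s; excluded by Pre_)
  let u := (PySem.List.pyRange 0 (sl.length : Int) 1).map (fun i => PySem.List.pyGetD tl i ' ')
  let a := PySem.List.sorted sl (fun c => c) false
  let b := PySem.List.sorted u (fun c => c) false
  (a.length : Int) - pvMerge a b

-- ===== PRECONDITION & SPEC =====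
-- Pre_ excludes exactly the inputs with len(t) < len(s), on which A (and B) raise IndexError at t[i].
def Pre_minSteps1 (s : String) (t : String) : Prop := s.toList.length ≤ t.toList.length
instance (s : String) (t : String) : Decidable (Pre_minSteps1 s t) := by unfold Pre_minSteps1; infer_instance
def pvWitness_minSteps1 : String × String := ("bab", "abc")

def Spec_minSteps1 (s : String) (t : String) (out : Int) : Prop := out = minSteps1_alt s t
instance (s : String) (t : String) (out : Int) : Decidable (Spec_minSteps1 s t out) := by unfold Spec_minSteps1; infer_instance

-- ===== CLAIM (what is proved, stated in full; the proofs are below) =====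
def Claim_equal_minSteps1 : Prop := ∀ (s : String) (t : String), Dom_minSteps1 s t → Pre_minSteps1 s t → Spec_minSteps1 s t (minSteps1 s t)

-- ===== LEMMAS AND PROOFS =====
-- helper: the positive-excess value A sums per distinct character of s
def pvPos (sl u : List Char) (k : Char) : Int :=
  if ((sl.count k : Int) - (u.count k : Int) > 0) then (sl.count k : Int) - (u.count k : Int) else 0

lemma pv_insert_one_eq_modify (d : PySem.Dict Char Int) (x : Char) (h : d.contains x = false) :
    d.insert x 1 = d.modify x 0 (· + 1) := by
  simp [PySem.Dict.insert, PySem.Dict.modify, h, PySem.Dict.getD_of_not_contains d 0 h]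

lemma pv_branchy_eq_modify (d : PySem.Dict Char Int) (x : Char) :
    (if d.contains x = false then d.insert x 1 else d.modify x 0 (· + 1)) = d.modify x 0 (· + 1) := by
  by_cases h : d.contains x = false
  · simp [h, pv_insert_one_eq_modify d x h]
  · simp [h]

-- A's first loop builds the two counters
lemma pv_A_dicts (sl tl : List Char) (h : sl.length ≤ tl.length) :
    (PySem.List.enumerate sl 0).foldl
      (fun (st : PySem.Dict Char Int × PySem.Dict Char Int) p =>
        (if st.1.contains p.2 = false then st.1.insert p.2 1 else st.1.modify p.2 0 (· + 1),
         let c := PySem.List.pyGetD tl p.1 ' ';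
         if st.2.contains c = false then st.2.insert c 1 else st.2.modify c 0 (· + 1)))
      (PySem.Dict.empty, PySem.Dict.empty)
    = (PySem.Dict.counter sl, PySem.Dict.counter (tl.take sl.length)) := by
  induction sl using List.reverseRecOn with
  | nil => simp [PySem.List.enumerate_nil, PySem.Dict.counter_eq_foldl]
  | append_singleton xs x ih =>
    have hx : xs.length < tl.length := by
      have := h; simp at this; omega
    rw [PySem.List.enumerate_append]
    rw [List.foldl_append, ih (le_of_lt hx)]
    simp only [PySem.List.enumerate_cons, PySem.List.enumerate_nil, List.foldl_cons, List.foldl_nil]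
    have hget : PySem.List.pyGetD tl ((0 : Int) + (xs.length : Int)) ' ' = tl[xs.length] := by
      rw [zero_add]
      exact PySem.List.pyGetD_eq_getElem tl ' ' (by positivity) (by exact_mod_cast hx)
    have htake : tl.take (xs.length + 1) = tl.take xs.length ++ [tl[xs.length]] := by
      rw [List.take_add_one]; simp [List.getElem?_eq_getElem hx]
    simp only [hget, List.length_append, List.length_cons, List.length_nil, htake]
    simp only [pv_branchy_eq_modify, PySem.Dict.counter_append_singleton]

-- A's result as a sum of positive differences over the distinct chars of s
lemma pv_A_eq (s t : String) (h : s.toList.length ≤ t.toList.length) :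
    minSteps1 s t
      = ((PySem.Set.ofList s.toList).map (pvPos s.toList (t.toList.take s.toList.length))).sum := by
  simp only [minSteps1]
  rw [pv_A_dicts s.toList t.toList h]
  rw [PySem.Dict.items_counter]
  rw [List.foldl_map]
  rw [PySem.List.foldl_congr_mem _ _
      (fun acc k => acc + pvPos s.toList (t.toList.take s.toList.length) k) 0 ?_]
  · rw [PySem.List.foldl_add]
    simp
  · intro acc k hk
    have hks : k ∈ s.toList := (PySem.Set.mem_ofList _ _).1 hk
    have hcs : 0 < s.toList.count k := List.count_pos_iff.2 hks
    simp only [PySem.Dict.contains_counter, PySem.Dict.getD_counter, pvPos]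
    by_cases hu : k ∈ t.toList.take s.toList.length
    · have : (t.toList.take s.toList.length).contains k = true := by simpa using hu
      simp only [this]
      split_ifs <;> (try simp_all) <;> push_cast <;> omega
    · have h0 : (t.toList.take s.toList.length).contains k = false := by simpa using hu
      have hc0 : (t.toList.take s.toList.length).count k = 0 := by
        simpa using List.count_eq_zero.2 hu
      simp only [h0, hc0]
      split_ifs <;> (try simp_all) <;> push_cast <;> omega

-- B's comprehension builds the length-|s| prefix of t
lemma pv_u_eq (sl tl : List Char) (h : sl.length ≤ tl.length) :
    (PySem.List.pyRange 0 (sl.length : Int) 1).map (fun i => PySem.List.pyGetD tl i ' ')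
      = tl.take sl.length := by
  set u := tl.take sl.length with hu
  have hlen : u.length = sl.length := by simp [hu, List.length_take]; omega
  have hcongr : ∀ j ∈ PySem.List.pyRange 0 (sl.length : Int) 1,
      PySem.List.pyGetD tl j ' ' = PySem.List.pyGetD u j ' ' := by
    intro j hj
    rw [PySem.List.mem_pyRange_one] at hj
    have hjt : j < (tl.length : Int) := lt_of_lt_of_le hj.2 (by exact_mod_cast h)
    rw [PySem.List.pyGetD_eq_getElem tl ' ' hj.1 hjt]
    rw [PySem.List.pyGetD_eq_getElem u ' ' hj.1 (by rw [hlen]; exact hj.2)]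
    simp only [hu]
    rw [List.getElem_take]
  rw [List.map_congr_left hcongr, ← hlen]
  exact PySem.List.map_pyGetD_pyRange_zero' u ' '

-- the two-pointer merge on sorted lists counts the multiset intersection
lemma pv_merge_card (a b : List Char)
    (ha : a.Pairwise (· ≤ ·)) (hb : b.Pairwise (· ≤ ·)) :
    pvMerge a b = (((a : Multiset Char) ∩ (b : Multiset Char)).card : Int) := by
  induction a, b using pvMerge.induct with
  | case1 b => simp [pvMerge]
  | case2 x xs => simp [pvMerge]
  | case3 xs y ys ih =>
    have hint : ((y :: xs : List Char) : Multiset Char) ∩ ((y :: ys : List Char) : Multiset Char)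
        = y ::ₘ (((xs : Multiset Char) ∩ (ys : Multiset Char))) := by
      ext c
      simp only [Multiset.count_inter, Multiset.count_cons, Multiset.coe_count, List.count_cons]
      split_ifs <;> simp_all <;> omega
    rw [pvMerge, if_pos rfl, hint, Multiset.card_cons,
      ih (List.Pairwise.of_cons ha) (List.Pairwise.of_cons hb)]
    push_cast; ring
  | case4 x xs y ys hne hlt ih =>
    have hx : x ∉ y :: ys := by
      intro hmem
      rcases List.mem_cons.1 hmem with h | h
      · exact hne h
      · exact absurd (List.rel_of_pairwise_cons hb h) (not_le.2 hlt)
    have h0 : List.count x (y :: ys) = 0 := List.count_eq_zero.2 hx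
    have hint : ((x :: xs : List Char) : Multiset Char) ∩ ((y :: ys : List Char) : Multiset Char)
        = ((xs : Multiset Char) ∩ ((y :: ys : List Char) : Multiset Char)) := by
      ext c
      simp only [Multiset.count_inter, Multiset.coe_count]
      by_cases hc : c = x
      · subst hc
        rw [h0, List.count_cons_self]
        simp
      · rw [List.count_cons_of_ne (fun e => hc e.symm)]
    rw [pvMerge, if_neg hne, if_pos hlt, hint, ih (List.Pairwise.of_cons ha) hb]
  | case5 x xs y ys hne hnlt ih =>
    have hy : y ∉ x :: xs := by
      intro hmem
      rcases List.mem_cons.1 hmem with h | h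
      · exact hne h.symm
      · have hle := List.rel_of_pairwise_cons ha h
        have hyx : y < x := lt_of_le_of_ne (not_lt.1 hnlt) (fun e => hne e.symm)
        exact absurd hle (not_le.2 hyx)
    have h0 : List.count y (x :: xs) = 0 := List.count_eq_zero.2 hy
    have hint : ((x :: xs : List Char) : Multiset Char) ∩ ((y :: ys : List Char) : Multiset Char)
        = (((x :: xs : List Char) : Multiset Char) ∩ (ys : Multiset Char)) := by
      ext c
      simp only [Multiset.count_inter, Multiset.coe_count]
      by_cases hc : c = y
      · subst hc
        rw [h0, List.count_cons_self]
        simp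
      · rw [List.count_cons_of_ne (fun e => hc e.symm)]
    rw [pvMerge, if_neg hne, if_neg hnlt, hint, ih ha (List.Pairwise.of_cons hb)]

-- B's value in closed form: |s| minus the multiset-intersection size with t's prefix
lemma pv_B_eq (s t : String) (h : s.toList.length ≤ t.toList.length) :
    minSteps1_alt s t
      = (s.toList.length : Int)
        - (((s.toList : Multiset Char) ∩ ((t.toList.take s.toList.length : List Char) : Multiset Char)).card : Int) := by
  simp only [minSteps1_alt]
  rw [pv_u_eq s.toList t.toList h]
  set u := t.toList.take s.toList.length with hu
  have hsa : (PySem.List.sorted s.toList (fun c => c) false).Pairwise (· ≤ ·) :=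
    PySem.List.sorted_pairwise s.toList (fun c => c)
  have hsb : (PySem.List.sorted u (fun c => c) false).Pairwise (· ≤ ·) :=
    PySem.List.sorted_pairwise u (fun c => c)
  rw [pv_merge_card _ _ hsa hsb]
  have pa : ((PySem.List.sorted s.toList (fun c => c) false : List Char) : Multiset Char)
      = (s.toList : Multiset Char) :=
    Multiset.coe_eq_coe.2 (PySem.List.sorted_perm s.toList (fun c => c) false)
  have pb : ((PySem.List.sorted u (fun c => c) false : List Char) : Multiset Char)
      = (u : Multiset Char) :=
    Multiset.coe_eq_coe.2 (PySem.List.sorted_perm u (fun c => c) false)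
  rw [pa, pb, PySem.List.length_sorted]

-- the arithmetic bridge: Σ positive excesses over distinct chars of s = |s| − |s ∩ u|
lemma pv_sum_pos (sl u : List Char) :
    ∑ k ∈ sl.toFinset, pvPos sl u k
      = (sl.length : Int) - (((sl : Multiset Char) ∩ (u : Multiset Char)).card : Int) := by
  have hpoint : ∀ k, pvPos sl u k
      = (sl.count k : Int) - (min (sl.count k) (u.count k) : Int) := by
    intro k
    simp only [pvPos]
    split_ifs with hp <;> push_cast <;> omega
  calc ∑ k ∈ sl.toFinset, pvPos sl u k
      = ∑ k ∈ sl.toFinset, ((sl.count k : Int) - (min (sl.count k) (u.count k) : Int)) := by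
        exact Finset.sum_congr rfl (fun k _ => hpoint k)
    _ = (∑ k ∈ sl.toFinset, (sl.count k : Int))
        - ∑ k ∈ sl.toFinset, (min (sl.count k) (u.count k) : Int) := by
        rw [Finset.sum_sub_distrib]
    _ = (sl.length : Int) - (((sl : Multiset Char) ∩ (u : Multiset Char)).card : Int) := by
        congr 1
        · have hlen : ∑ k ∈ sl.toFinset, sl.count k = sl.length := by
            simpa using Multiset.toFinset_sum_count_eq (sl : Multiset Char)
          rw [← Nat.cast_sum]
          exact_mod_cast congrArg (Nat.cast : ℕ → ℤ) hlen
        · set m := (sl : Multiset Char) ∩ (u : Multiset Char) with hm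
          have hcard : m.card = ∑ k ∈ m.toFinset, m.count k :=
            (Multiset.toFinset_sum_count_eq m).symm
          have hsub : m.toFinset ⊆ sl.toFinset := by
            intro k hk
            rw [Multiset.mem_toFinset, hm, Multiset.mem_inter] at hk
            simpa [List.mem_toFinset] using hk.1
          have hext : ∑ k ∈ sl.toFinset, m.count k = ∑ k ∈ m.toFinset, m.count k := by
            refine (Finset.sum_subset hsub ?_).symm
            intro k _ hk
            rw [Multiset.mem_toFinset] at hk
            exact Multiset.count_eq_zero.2 hk
          have hmin : ∀ k, m.count k = min (sl.count k) (u.count k) := by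
            intro k
            rw [hm, Multiset.count_inter]
            simp [Multiset.coe_count]
          rw [hcard, ← hext]
          push_cast
          exact Finset.sum_congr rfl (fun k _ => by rw [hmin k]; push_cast; rfl)

lemma pv_main (s t : String) (h : s.toList.length ≤ t.toList.length) :
    minSteps1 s t = minSteps1_alt s t := by
  rw [pv_A_eq s t h, pv_B_eq s t h]
  set sl := s.toList
  set u := t.toList.take sl.length
  have hfin : (PySem.Set.ofList sl).toFinset = sl.toFinset := by
    ext k
    simp [List.mem_toFinset, PySem.Set.mem_ofList]
  rw [← List.sum_toFinset _ (PySem.Set.nodup_ofList sl), hfin]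
  exact pv_sum_pos sl u

-- ===== VERDICT (by name: the statement is the Claim_ definition above) =====
theorem minSteps1_spec : Claim_equal_minSteps1 := by
  intro s t _ hpre
  unfold Spec_minSteps1
  exact pv_main s t hpre
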